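-- pv_equiv track=rewrite | github.com/data-to-insight/csc-map-of-the-world | admin_scripts/dev-testing-scale_up_yml.py | gen_star_distributed
-- ===== SOURCE A (Python) =====
-- from typing import List, Tuple, Iterable, Set
--
-- def _dedup_edges(pairs: Iterable[Tuple[int,int]], n: int) -> List[Tuple[int,int]]:
--     """Ensure i != j, store one undirected edge per pair as (min, max), drop out of range."""
--     seen: Set[Tuple[int,int]] = set()
--     out: List[Tuple[int,int]] = []
--     for i, j in pairs:
--         if i == j:
--             continue
--         if not (0 <= i < n and 0 <= j < n):
--             continue
--         a, b = (i, j) if i < j else (j, i)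
--         if (a, b) in seen:
--             continue
--         seen.add((a, b))
--         out.append((a, b))
--     return out
--
-- def gen_star_distributed(n: int, span: int) -> List[Tuple[int,int]]:
--     """Partition by 'span', pick the first in each block as hub, connect hub to others in block."""
--     if span < 2:
--         span = 2
--     pairs = []
--     for start in range(0, n, span):
--         end = min(start + span, n)
--         if end - start < 2:
--             continue
--         hub = start
--         for j in range(start+1, end):
--             pairs.append((hub, j))
--     return _dedup_edges(pairs, n)
-- ===== SOURCE B (Python) =====
-- def gen_star_distributed(n, span):
--     if span < 2:
--         span = 2
--     return [((j // span) * span, j) for j in range(n) if j % span != 0]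
-- ===== Notes on version B (the rewrite author's own statement) =====
-- stated objective: simpler
-- what changed: Replaced the block-wise pair generation plus the seen-set dedup/normalize pass by a single flat comprehension over vertices that computes each non-hub vertex's hub arithmetically as (j // span) * span.
import Mathlib
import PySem

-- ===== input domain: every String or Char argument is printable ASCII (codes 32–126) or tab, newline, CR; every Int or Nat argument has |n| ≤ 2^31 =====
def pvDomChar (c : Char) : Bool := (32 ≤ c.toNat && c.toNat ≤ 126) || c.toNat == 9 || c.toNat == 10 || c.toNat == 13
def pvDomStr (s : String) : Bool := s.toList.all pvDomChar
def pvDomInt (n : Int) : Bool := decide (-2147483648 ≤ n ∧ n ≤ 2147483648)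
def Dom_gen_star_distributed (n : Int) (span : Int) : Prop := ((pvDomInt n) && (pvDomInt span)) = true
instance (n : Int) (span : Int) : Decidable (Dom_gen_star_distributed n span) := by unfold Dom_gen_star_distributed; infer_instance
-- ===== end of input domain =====

-- B replaces the block loops plus the seen-set dedup/normalize pass by one flat pass over
-- vertices computing each non-hub vertex's hub arithmetically (objective: simpler).

-- ===== PORT A =====
-- loop body of _dedup_edges
-- the normalized pair `q = (i, j) if i < j else (j, i)` is inlined
def pvDedupStep (n : Int) (st : PySem.Set (Int × Int) × List (Int × Int)) (p : Int × Int) :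
    PySem.Set (Int × Int) × List (Int × Int) :=
  if p.1 = p.2 then st
  else if ¬(0 ≤ p.1 ∧ p.1 < n ∧ 0 ≤ p.2 ∧ p.2 < n) then st
  else if PySem.Set.contains st.1 (if p.1 < p.2 then (p.1, p.2) else (p.2, p.1)) then st
  else (PySem.Set.add st.1 (if p.1 < p.2 then (p.1, p.2) else (p.2, p.1)),
        st.2 ++ [if p.1 < p.2 then (p.1, p.2) else (p.2, p.1)])

def pvDedupEdges (pairs : List (Int × Int)) (n : Int) : List (Int × Int) :=
  (pairs.foldl (pvDedupStep n) (PySem.Set.empty, [])).2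

-- loop body of the block loop in gen_star_distributed
-- `end = min(start + span, n)` is inlined as `min (start + s) n`
def pvBlockStep (n s : Int) (acc : List (Int × Int)) (start : Int) : List (Int × Int) :=
  if min (start + s) n - start < 2 then acc
  else acc ++ (PySem.List.pyRange (start + 1) (min (start + s) n) 1).map (fun j => (start, j))

def gen_star_distributed (n : Int) (span : Int) : List (Int × Int) :=
  let span := if span < 2 then 2 else span
  let pairs := (PySem.List.pyRange 0 n span).foldl (pvBlockStep n span) []
  pvDedupEdges pairs n

-- ===== PORT B =====
def gen_star_distributed_alt (n : Int) (span : Int) : List (Int × Int) :=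
  let span := if span < 2 then 2 else span
  ((PySem.List.pyRange 0 n 1).filter (fun j => PySem.Int.mod j span != 0)).map
    (fun j => (PySem.Int.floordiv j span * span, j))

-- ===== PRECONDITION & SPEC =====
def Spec_gen_star_distributed (n : Int) (span : Int) (out : List (Int × Int)) : Prop := out = gen_star_distributed_alt n span
instance (n : Int) (span : Int) (out : List (Int × Int)) : Decidable (Spec_gen_star_distributed n span out) := by unfold Spec_gen_star_distributed; infer_instance

-- ===== CLAIM (what is proved, stated in full; the proofs are below) =====
def Claim_equal_gen_star_distributed : Prop := ∀ (n : Int) (span : Int), Dom_gen_star_distributed n span → Spec_gen_star_distributed n span (gen_star_distributed n span)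

-- ===== LEMMAS AND PROOFS =====

-- B's list for bound m (helper for the proofs only)
def pvStar (s m : Int) : List (Int × Int) :=
  ((PySem.List.pyRange 0 m 1).filter (fun j => PySem.Int.mod j s != 0)).map
    (fun j => (PySem.Int.floordiv j s * s, j))

-- the block-loop guard is redundant: when it fires the block range is empty
lemma pvBlockStep_eq_append (n s : Int) (acc : List (Int × Int)) (start : Int) :
    pvBlockStep n s acc start
      = acc ++ (PySem.List.pyRange (start + 1) (min (start + s) n) 1).map (fun j => (start, j)) := by
  unfold pvBlockStep
  split_ifs with h
  · rw [PySem.List.pyRange_one_eq_nil (by omega)]; simp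
  · rfl

-- the block loop over starts 0, s, …, s*(N-1) produces exactly B's list up to min (s*N) n
lemma pvBlocks (s n : Int) (hs : 2 ≤ s) : ∀ N : Nat,
    (((List.range N).map (fun k : Nat => (0 : Int) + s * (k : Int))).foldl (pvBlockStep n s) [])
      = pvStar s (min (s * N) n) := by
  intro N
  induction N with
  | zero =>
      unfold pvStar
      rw [PySem.List.pyRange_one_eq_nil (by push_cast; omega)]
      simp
  | succ N ih =>
      rw [List.range_succ, List.map_append, List.foldl_append]
      simp only [List.map_cons, List.map_nil, List.foldl_cons, List.foldl_nil]
      rw [ih, pvBlockStep_eq_append]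
      have ha0 : (0 : Int) ≤ s * (N : Int) := by positivity
      by_cases h : n ≤ s * (N : Int)
      · have hmin1 : min (s * (N : Int)) n = n := min_eq_right h
        have hmin2 : min (s * ((N + 1 : Nat) : Int)) n = n := by
          apply min_eq_right
          have : s * ((N + 1 : Nat) : Int) = s * (N : Int) + s := by push_cast; ring
          linarith
        rw [hmin1, hmin2, PySem.List.pyRange_one_eq_nil]
        · simp
        · have h1 : min ((0 : Int) + s * (N : Int) + s) n ≤ n := min_le_right _ _
          linarith
      · push Not at h
        have hmin1 : min (s * (N : Int)) n = s * (N : Int) := min_eq_left (le_of_lt h)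
        have hkey : s * ((N + 1 : Nat) : Int) = s * (N : Int) + s := by push_cast; ring
        rw [hmin1, hkey]
        simp only [zero_add]
        set a := s * (N : Int) with ha
        have hae : a ≤ min (a + s) n := le_min (by linarith) (le_of_lt h)
        have halt : a < min (a + s) n := lt_min (by linarith) h
        conv_rhs => rw [pvStar, PySem.List.pyRange_one_append 0 a (min (a + s) n) ha0 hae]
        rw [List.filter_append, List.map_append]
        have hfirst : ((PySem.List.pyRange 0 a 1).filter (fun j => PySem.Int.mod j s != 0)).map
            (fun j => (PySem.Int.floordiv j s * s, j)) = pvStar s a := rfl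
        rw [hfirst]
        congr 1
        rw [PySem.List.pyRange_one_cons halt, List.filter_cons]
        have hz : (PySem.Int.mod a s != 0) = false := by
          have hm0 : PySem.Int.mod a s = 0 :=
            (PySem.Int.mod_eq_zero_iff_dvd a s).mpr ⟨(N : Int), ha⟩
          simp [hm0]
        rw [hz]
        simp only [Bool.false_eq_true, if_false]
        have htail : ∀ j ∈ PySem.List.pyRange (a + 1) (min (a + s) n) 1,
            (PySem.Int.mod j s != 0) = true := by
          intro j hj
          rw [PySem.List.mem_pyRange_one] at hj
          have hje : j < a + s := lt_of_lt_of_le hj.2 (min_le_left _ _)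
          simp only [bne_iff_ne, ne_eq]
          intro hmod
          obtain ⟨m, hm⟩ := (PySem.Int.mod_eq_zero_iff_dvd j s).mp hmod
          have hb1 : s * (N : Int) < s * m := by rw [← ha, ← hm]; linarith
          have hb2 : s * m < s * ((N : Int) + 1) := by
            rw [← hm, mul_add, mul_one, ← ha]; linarith
          have h1 : (N : Int) < m := lt_of_mul_lt_mul_left hb1 (by omega)
          have h2 : m < (N : Int) + 1 := lt_of_mul_lt_mul_left hb2 (by omega)
          omega
        rw [List.filter_eq_self.mpr htail]
        apply List.map_congr_left
        intro j hj
        rw [PySem.List.mem_pyRange_one] at hj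
        have hje : j < a + s := lt_of_lt_of_le hj.2 (min_le_left _ _)
        have hfd : PySem.Int.floordiv j s = (N : Int) := by
          rw [PySem.Int.floordiv_eq_iff_of_pos (by omega)]
          constructor
          · rw [mul_comm, ← ha]; linarith
          · rw [add_mul, one_mul, mul_comm, ← ha]; linarith
        rw [hfd, mul_comm, ← ha]

-- the dedup fold is the identity on an in-range, normalized, duplicate-free pair list
lemma pvDedup_go (n : Int) : ∀ (l : List (Int × Int)) (seen : PySem.Set (Int × Int)) (out : List (Int × Int)),
    (∀ p ∈ l, 0 ≤ p.1 ∧ p.1 < p.2 ∧ p.2 < n) → l.Nodup → (∀ p ∈ l, p ∉ seen) →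
    (l.foldl (pvDedupStep n) (seen, out)).2 = out ++ l := by
  intro l
  induction l with
  | nil => intro seen out _ _ _; simp
  | cons p t ih =>
      intro seen out hb hnd hseen
      obtain ⟨h1, h2, h3⟩ := hb p (List.mem_cons_self)
      simp only [List.foldl_cons]
      have hstep : pvDedupStep n (seen, out) p = (PySem.Set.add seen p, out ++ [p]) := by
        unfold pvDedupStep
        have hq : (if p.1 < p.2 then (p.1, p.2) else (p.2, p.1)) = p := by
          rw [if_pos h2]
        rw [if_neg (ne_of_lt h2), if_neg (not_not_intro ⟨h1, by omega, by omega, h3⟩), hq]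
        have hc : PySem.Set.contains seen p = false := by
          have := hseen p (List.mem_cons_self)
          simpa [PySem.Set.contains] using this
        simp only [hc]
        simp
      rw [hstep, ih (PySem.Set.add seen p) (out ++ [p])
        (fun q hq => hb q (List.mem_cons_of_mem _ hq))
        hnd.of_cons
        (by
          intro q hq hmem
          rcases (PySem.Set.mem_add seen p q).mp hmem with hin | rfl
          · exact hseen q (List.mem_cons_of_mem _ hq) hin
          · exact (List.nodup_cons.mp hnd).1 hq)]
      simp

lemma pvStar_bounds (s n : Int) (hs : 2 ≤ s) :
    ∀ p ∈ pvStar s n, 0 ≤ p.1 ∧ p.1 < p.2 ∧ p.2 < n := by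
  intro p hp
  unfold pvStar at hp
  simp only [List.mem_map, List.mem_filter] at hp
  obtain ⟨j, ⟨hjmem, hjmod⟩, rfl⟩ := hp
  rw [PySem.List.mem_pyRange_one] at hjmem
  rw [bne_iff_ne] at hjmod
  have h0 : (0 : Int) < s := by omega
  have hdm := PySem.Int.floordiv_mul_add_mod j s
  have hmn := PySem.Int.mod_nonneg j h0
  have hmpos : 0 < PySem.Int.mod j s := lt_of_le_of_ne hmn (Ne.symm hjmod)
  have hdnn : 0 ≤ PySem.Int.floordiv j s := by
    rw [PySem.Int.floordiv_eq_ediv_of_pos h0]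
    exact Int.ediv_nonneg hjmem.1 (by omega)
  refine ⟨mul_nonneg hdnn (by omega), by simp only; linarith, hjmem.2⟩

lemma pvStar_nodup (s n : Int) : (pvStar s n).Nodup := by
  unfold pvStar
  apply List.Nodup.map
  · intro a b hab
    exact congrArg Prod.snd hab
  · exact (PySem.List.nodup_pyRange_one 0 n).filter _

-- ===== VERDICT (by name: the statement is the Claim_ definition above) =====
theorem gen_star_distributed_spec : Claim_equal_gen_star_distributed := by
  unfold Claim_equal_gen_star_distributed
  intro n span _
  unfold Spec_gen_star_distributed gen_star_distributed gen_star_distributed_alt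
  set s : Int := if span < 2 then 2 else span with hsdef
  have hs : 2 ≤ s := by rw [hsdef]; split <;> omega
  simp only []
  rw [PySem.List.pyRange_of_pos 0 n (by omega), pvBlocks s n hs]
  have hmin : min (s * ((if (0:Int) < n then ((n - 0 + s - 1) / s).toNat else 0 : Nat) : Int)) n = n := by
    split_ifs with hn
    · set q : Int := (n - 0 + s - 1) / s with hq
      have hq0 : 0 ≤ q := by
        rw [hq]
        exact Int.ediv_nonneg (by omega) (by omega)
      have hdm := Int.mul_ediv_add_emod (n - 0 + s - 1) s
      have hr0 := Int.emod_nonneg (n - 0 + s - 1) (show s ≠ 0 by omega)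
      have hrlt := Int.emod_lt_of_pos (n - 0 + s - 1) (show (0:Int) < s by omega)
      have hle : n ≤ s * q := by rw [hq]; linarith
      rw [Int.toNat_of_nonneg hq0]
      exact min_eq_right hle
    · push Not at hn
      simp only [Nat.cast_zero, mul_zero]
      exact min_eq_right hn
  rw [hmin]
  show pvDedupEdges (pvStar s n) n = pvStar s n
  unfold pvDedupEdges
  rw [pvDedup_go n (pvStar s n) PySem.Set.empty [] (pvStar_bounds s n hs)
    (pvStar_nodup s n) (by intro p hp hmem; exact (List.not_mem_nil).elim hmem)]
  simp
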